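-- pv_equiv track=rewrite | github.com/josue-albLo/python_data_structures_exercises | listas_tuplas/delete_for_number.py | delete_letter
-- ===== SOURCE A (Python) =====
-- def delete_letter(lts_abc:list)->list:
--     """ This function returns a list with non-zeros elements
--
--     Args:
--         lts_abc (list): value of the variable is a list of alphabetic elements
--
--     Returns:
--         list: returns a list with elements that are not multiples of three
--     """
--     tam = len(lts_abc)
--     new_lts = []
--     for i in range(0,tam-1):
--         if i % 3 == 0:
--             continue
--         new_lts.append(lts_abc[i])
--     return new_lts
-- ===== SOURCE B (Python) =====
-- def delete_letter(lts_abc: list) -> list: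
--     out = lts_abc[:len(lts_abc) - 1]
--     del out[::3]
--     return out
-- ===== Notes on version B (the rewrite author's own statement) =====
-- stated objective: idiomatic
-- what changed: Replaces the explicit index loop with continue-filtering by a prefix slice copy followed by extended-slice deletion del out[::3].
import Mathlib
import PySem

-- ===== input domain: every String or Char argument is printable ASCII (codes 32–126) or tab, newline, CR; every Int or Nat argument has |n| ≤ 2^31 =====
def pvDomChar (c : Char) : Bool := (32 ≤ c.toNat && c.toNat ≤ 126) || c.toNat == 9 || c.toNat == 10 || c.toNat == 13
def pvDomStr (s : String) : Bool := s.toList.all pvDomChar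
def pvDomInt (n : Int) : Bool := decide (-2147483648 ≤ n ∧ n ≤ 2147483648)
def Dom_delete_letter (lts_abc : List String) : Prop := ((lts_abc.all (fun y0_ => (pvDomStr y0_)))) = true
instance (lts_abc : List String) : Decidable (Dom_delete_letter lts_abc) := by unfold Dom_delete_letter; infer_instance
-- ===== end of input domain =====

-- B replaces A's index loop (skip i % 3 == 0 via continue) by copying the prefix slice
-- lts_abc[:len-1] and deleting every third element (del out[::3]); idiomatic, same cost.

-- ===== PORT A =====
def delete_letter (lts_abc : List String) : List String :=
  let tam : Int := lts_abc.length
  (PySem.List.pyRange 0 (tam - 1) 1).foldl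
    (fun new_lts i =>
      if PySem.Int.mod i 3 == 0 then new_lts
      else new_lts ++ [PySem.List.pyGetD lts_abc i ""]) []

-- ===== PORT B =====
-- `del out[::3]` has no PySem primitive; it is ported exactly as: keep the elements of
-- `out` whose index is not a multiple of 3 (CPython deletes indices 0,3,6,… of out).
def delete_letter_alt (lts_abc : List String) : List String :=
  let out := PySem.List.slice lts_abc none (some ((lts_abc.length : Int) - 1))
  ((PySem.List.enumerate out).filter (fun p => PySem.Int.mod p.1 3 != 0)).map (·.2)

-- ===== PRECONDITION & SPEC =====
def Spec_delete_letter (lts_abc : List String) (out : List String) : Prop := out = delete_letter_alt lts_abc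
instance (lts_abc : List String) (out : List String) : Decidable (Spec_delete_letter lts_abc out) := by unfold Spec_delete_letter; infer_instance

-- ===== CLAIM (what is proved, stated in full; the proofs are below) =====
def Claim_equal_delete_letter : Prop := ∀ (lts_abc : List String), Dom_delete_letter lts_abc → Spec_delete_letter lts_abc (delete_letter lts_abc)

-- ===== LEMMAS AND PROOFS =====

theorem pv_enumerate_append {α : Type} (a b : List α) (s : Int) :
    PySem.List.enumerate (a ++ b) s
      = PySem.List.enumerate a s ++ PySem.List.enumerate b (s + a.length) := by
  induction a generalizing s with
  | nil => simp [PySem.List.enumerate_nil]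
  | cons x xs ih =>
      simp only [List.cons_append, PySem.List.enumerate_cons, ih (s + 1), List.length_cons]
      have : s + 1 + (xs.length : Int) = s + ((xs.length : Int) + 1) := by omega
      rw [this]
      push_cast
      ring_nf

theorem pv_key (xs : List String) :
    ∀ n : Nat, n ≤ xs.length →
      (PySem.List.pyRange 0 (n : Int) 1).foldl
        (fun new_lts i =>
          if PySem.Int.mod i 3 == 0 then new_lts
          else new_lts ++ [PySem.List.pyGetD xs i ""]) []
      = ((PySem.List.enumerate (xs.take n)).filter
          (fun p => PySem.Int.mod p.1 3 != 0)).map (·.2) := by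
  intro n
  induction n with
  | zero => intro _; simp 
  | succ m ih =>
      intro h
      have hm : m < xs.length := Nat.lt_of_succ_le h
      have hcast : ((m + 1 : Nat) : Int) = (m : Int) + 1 := by push_cast; ring
      rw [hcast, PySem.List.pyRange_one_succ_right (by positivity), List.foldl_append,
        ih (Nat.le_of_lt hm)]
      have htake : xs.take (m + 1) = xs.take m ++ [xs[m]] := by
        rw [List.take_add_one]; simp [List.getElem?_eq_getElem hm]
      rw [htake, pv_enumerate_append, List.filter_append, List.map_append]
      have hlen : ((xs.take m).length : Int) = (m : Int) := by
        simp [List.length_take, Nat.min_eq_left (Nat.le_of_lt hm)]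
      simp only [List.foldl_cons, List.foldl_nil, PySem.List.enumerate_cons,
        PySem.List.enumerate_nil, hlen, Int.zero_add]
      by_cases hd : (3 : Int) ∣ (m : Int)
      · have hz : (m : Int) % 3 = 0 := Int.emod_eq_zero_of_dvd hd
        simp [hz]
      · have hz : (m : Int) % 3 ≠ 0 := fun hc => hd (Int.dvd_of_emod_eq_zero hc)
        simp [hz, PySem.List.pyGetD_natCast, List.getElem?_eq_getElem hm]

-- ===== VERDICT (by name: the statement is the Claim_ definition above) =====
theorem delete_letter_spec : Claim_equal_delete_letter := by
  intro xs _
  unfold Spec_delete_letter delete_letter delete_letter_alt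
  cases xs with
  | nil => decide
  | cons y ys =>
      have hlen : (((y :: ys).length : Int) - 1) = ((ys.length : Nat) : Int) := by
        push_cast [List.length_cons]; ring
      rw [hlen, PySem.List.slice_to _ (by positivity)]
      simpa using pv_key (y :: ys) ys.length (by simp)
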